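-- pv_equiv track=rewrite | github.com/Scientific-Computing-Lab/AdarEdit | Script/Evolution/get_ds_with_majority_ES.py | get_a_positions_in_window
-- ===== SOURCE A (Python) =====
-- from typing import List, Tuple
--
-- def get_relative_site(
--     start_1ds_genome: int,
--     end_1ds_genome: int,
--     start_2ds_genome: int,
--     end_2ds_genome: int,
--     position: int,
--     strand: str,
--     link: str,
-- ) -> int:
--     """Compute 0-based relative index of a genomic position within concatenated ds1 + link + ds2."""
--     ds_1 = start_1ds_genome <= position <= end_1ds_genome
--     ds_2 = not ds_1
--
--     if strand == "+":
--         if ds_1: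
--             rel = position - start_1ds_genome
--         else:
--             rel = (end_1ds_genome - start_1ds_genome + 1) + len(link) + (position - start_2ds_genome)
--     else:
--         if ds_1:
--             rel = end_1ds_genome - position + 1
--         else:
--             rel = (end_1ds_genome - start_1ds_genome + 1) + len(link) + (end_2ds_genome - position + 1)
--     return rel
--
-- def get_a_positions_in_window(
--     sequence: str,
--     start: int,
--     strand: str,
--     editing_sites: List[int],
--     start_1ds_genome: int,
--     end_1ds_genome: int,
--     start_2ds_genome: int,
--     end_2ds_genome: int,
--     link: str,
--     max_distance: int = 20,
-- ) -> List[Tuple[int, int, int]]: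
--     """Find As within max_distance of any editing site (exclude the sites themselves)."""
--     seq = sequence[::-1] if strand == "-" else sequence
--     out = []
--     for i, nt in enumerate(seq):
--         genomic_pos = start + i if strand == "+" else start + i + 1
--         if nt == "A" and genomic_pos not in editing_sites:
--             for site in editing_sites:
--                 if abs(genomic_pos - site) <= max_distance:
--                     rel = get_relative_site(
--                         start_1ds_genome, end_1ds_genome, start_2ds_genome, end_2ds_genome, genomic_pos, strand, link
--                     ) + 1
--                     out.append((genomic_pos, rel, site))
--                     break
--     return out
-- ===== SOURCE B (Python) =====
-- def get_relative_site(start_1ds_genome, end_1ds_genome, start_2ds_genome, end_2ds_genome, position, strand, link):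
--     ds_1 = start_1ds_genome <= position <= end_1ds_genome
--     if strand == "+":
--         if ds_1:
--             rel = position - start_1ds_genome
--         else:
--             rel = (end_1ds_genome - start_1ds_genome + 1) + len(link) + (position - start_2ds_genome)
--     else:
--         if ds_1:
--             rel = end_1ds_genome - position + 1
--         else:
--             rel = (end_1ds_genome - start_1ds_genome + 1) + len(link) + (end_2ds_genome - position + 1)
--     return rel
--
-- def get_a_positions_in_window(sequence, start, strand, editing_sites, start_1ds_genome, end_1ds_genome, start_2ds_genome, end_2ds_genome, link, max_distance=20):
--     seq = sequence[::-1] if strand == "-" else sequence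
--     lo = start if strand == "+" else start + 1
--     sites = set(editing_sites)
--     # candidate genomic positions: the As that are not themselves editing sites, in sequence order
--     a_positions = [lo + i for i, nt in enumerate(seq) if nt == "A" and lo + i not in sites]
--     # site-major pass: first site (in list order) within max_distance of each candidate
--     first_site = {}
--     for site in editing_sites:
--         for pos in a_positions:
--             if abs(pos - site) <= max_distance and pos not in first_site:
--                 first_site[pos] = site
--     return [(pos,
--              get_relative_site(start_1ds_genome, end_1ds_genome, start_2ds_genome, end_2ds_genome, pos, strand, link) + 1,
--              first_site[pos])
--             for pos in a_positions if pos in first_site]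
-- ===== Notes on version B (the rewrite author's own statement) =====
-- stated objective: alternative
-- what changed: B first collects the candidate A-positions in one pass, then a site-major pass fills a first-wins dict mapping each candidate to the first editing site (in list order) within max_distance, so A's per-position inner scan with break disappears; the output is a comprehension over the candidates present in the dict.
import Mathlib
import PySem

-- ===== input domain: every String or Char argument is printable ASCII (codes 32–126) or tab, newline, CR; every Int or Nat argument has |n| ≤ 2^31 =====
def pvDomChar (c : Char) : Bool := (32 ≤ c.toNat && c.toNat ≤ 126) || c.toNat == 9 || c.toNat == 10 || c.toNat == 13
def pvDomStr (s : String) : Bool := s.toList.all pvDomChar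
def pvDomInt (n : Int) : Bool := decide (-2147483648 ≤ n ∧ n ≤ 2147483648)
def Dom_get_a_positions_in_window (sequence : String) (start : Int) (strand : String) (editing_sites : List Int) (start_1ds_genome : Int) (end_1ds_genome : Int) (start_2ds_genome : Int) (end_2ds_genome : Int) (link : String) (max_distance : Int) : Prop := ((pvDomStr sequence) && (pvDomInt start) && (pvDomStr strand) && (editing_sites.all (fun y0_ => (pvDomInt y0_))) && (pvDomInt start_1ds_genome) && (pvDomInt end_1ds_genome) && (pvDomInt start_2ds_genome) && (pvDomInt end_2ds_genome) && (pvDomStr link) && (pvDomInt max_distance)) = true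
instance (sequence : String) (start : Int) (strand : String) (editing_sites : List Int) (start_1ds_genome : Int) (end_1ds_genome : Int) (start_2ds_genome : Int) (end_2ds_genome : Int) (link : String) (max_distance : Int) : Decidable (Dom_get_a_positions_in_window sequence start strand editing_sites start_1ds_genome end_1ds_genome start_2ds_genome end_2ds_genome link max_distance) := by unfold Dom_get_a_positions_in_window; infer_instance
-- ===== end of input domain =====

-- ===== PORT A =====
-- B changes the traversal: a site-major first-wins table over the candidate A-positions replaces A's per-position scan of editing_sites.
-- helper shared by both ports (same module-level Python function get_relative_site)
def pvGetRelativeSite (start_1ds_genome end_1ds_genome start_2ds_genome end_2ds_genome position : Int) (strand link : String) : Int :=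
  if strand == "+" then
    if start_1ds_genome ≤ position ∧ position ≤ end_1ds_genome then position - start_1ds_genome
    else (end_1ds_genome - start_1ds_genome + 1) + PySem.Str.len link + (position - start_2ds_genome)
  else
    if start_1ds_genome ≤ position ∧ position ≤ end_1ds_genome then end_1ds_genome - position + 1
    else (end_1ds_genome - start_1ds_genome + 1) + PySem.Str.len link + (end_2ds_genome - position + 1)

-- A's inner 'for site in editing_sites: … break' — first site within max_distance
def pvFirstSiteIn (sites : List Int) (pos d : Int) : Option Int :=
  match sites with
  | [] => none
  | s :: rest => if |pos - s| ≤ d then some s else pvFirstSiteIn rest pos d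

def get_a_positions_in_window (sequence : String) (start : Int) (strand : String) (editing_sites : List Int) (start_1ds_genome : Int) (end_1ds_genome : Int) (start_2ds_genome : Int) (end_2ds_genome : Int) (link : String) (max_distance : Int) : List (Int × Int × Int) :=
  let seq : List Char := if strand == "-" then sequence.toList.reverse else sequence.toList
  (PySem.List.enumerate seq).foldl (fun out p =>
    let genomic_pos : Int := if strand == "+" then start + p.1 else start + p.1 + 1
    if p.2 == 'A' && !(editing_sites.contains genomic_pos) then
      match pvFirstSiteIn editing_sites genomic_pos max_distance with
      | some site => out ++ [(genomic_pos, pvGetRelativeSite start_1ds_genome end_1ds_genome start_2ds_genome end_2ds_genome genomic_pos strand link + 1, site)]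
      | none => out
    else out) []

-- ===== PORT B =====
def get_a_positions_in_window_alt (sequence : String) (start : Int) (strand : String) (editing_sites : List Int) (start_1ds_genome : Int) (end_1ds_genome : Int) (start_2ds_genome : Int) (end_2ds_genome : Int) (link : String) (max_distance : Int) : List (Int × Int × Int) :=
  let seq : List Char := if strand == "-" then sequence.toList.reverse else sequence.toList
  let lo : Int := if strand == "+" then start else start + 1
  let sites : PySem.Set Int := PySem.Set.ofList editing_sites
  let a_positions : List Int := (PySem.List.enumerate seq).filterMap (fun p =>
    if p.2 == 'A' && !(PySem.Set.contains sites (lo + p.1)) then some (lo + p.1) else none)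
  let first_site : PySem.Dict Int Int := editing_sites.foldl (fun t site =>
      a_positions.foldl (fun t pos =>
        if |pos - site| ≤ max_distance ∧ t.contains pos = false then t.insert pos site else t) t)
    PySem.Dict.empty
  a_positions.filterMap (fun pos =>
    match first_site.get? pos with
    | some site => some (pos, pvGetRelativeSite start_1ds_genome end_1ds_genome start_2ds_genome end_2ds_genome pos strand link + 1, site)
    | none => none)

-- ===== PRECONDITION & SPEC =====
def Spec_get_a_positions_in_window (sequence : String) (start : Int) (strand : String) (editing_sites : List Int) (start_1ds_genome : Int) (end_1ds_genome : Int) (start_2ds_genome : Int) (end_2ds_genome : Int) (link : String) (max_distance : Int) (out : List (Int × Int × Int)) : Prop := out = get_a_positions_in_window_alt sequence start strand editing_sites start_1ds_genome end_1ds_genome start_2ds_genome end_2ds_genome link max_distance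
instance (sequence : String) (start : Int) (strand : String) (editing_sites : List Int) (start_1ds_genome : Int) (end_1ds_genome : Int) (start_2ds_genome : Int) (end_2ds_genome : Int) (link : String) (max_distance : Int) (out : List (Int × Int × Int)) : Decidable (Spec_get_a_positions_in_window sequence start strand editing_sites start_1ds_genome end_1ds_genome start_2ds_genome end_2ds_genome link max_distance out) := by unfold Spec_get_a_positions_in_window; infer_instance

-- ===== CLAIM (what is proved, stated in full; the proofs are below) =====
def Claim_equal_get_a_positions_in_window : Prop := ∀ (sequence : String) (start : Int) (strand : String) (editing_sites : List Int) (start_1ds_genome : Int) (end_1ds_genome : Int) (start_2ds_genome : Int) (end_2ds_genome : Int) (link : String) (max_distance : Int), Dom_get_a_positions_in_window sequence start strand editing_sites start_1ds_genome end_1ds_genome start_2ds_genome end_2ds_genome link max_distance → Spec_get_a_positions_in_window sequence start strand editing_sites start_1ds_genome end_1ds_genome start_2ds_genome end_2ds_genome link max_distance (get_a_positions_in_window sequence start strand editing_sites start_1ds_genome end_1ds_genome start_2ds_genome end_2ds_genome link max_distance)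

-- ===== LEMMAS AND PROOFS =====

-- one site's pass over the candidates: lookup is the old value, else the site iff pos is a candidate within distance
lemma pvTblPassGet (ps : List Int) (t : PySem.Dict Int Int) (s d pos : Int) :
    (ps.foldl (fun t p => if |p - s| ≤ d ∧ t.contains p = false then t.insert p s else t) t).get? pos
      = if (t.get? pos).isSome then t.get? pos
        else if pos ∈ ps ∧ |pos - s| ≤ d then some s else none := by
  induction ps generalizing t with
  | nil => simp
  | cons q rest ih =>
    simp only [List.foldl_cons]
    rw [ih]
    by_cases hq : |q - s| ≤ d ∧ t.contains q = false
    · rw [if_pos hq]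
      by_cases hpe : pos = q
      · subst hpe
        have hnone : t.get? pos = none := by
          rw [PySem.Dict.get?_eq_none_iff_contains]; exact hq.2
        simp [PySem.Dict.get?_insert_self, hnone, hq.1]
      · rw [PySem.Dict.get?_insert_of_ne t s hpe]
        by_cases hp : (t.get? pos).isSome
        · simp [hp]
        · simp [hp, hpe]
    · rw [if_neg hq]
      by_cases hp : (t.get? pos).isSome
      · simp [hp]
      · by_cases hpe : pos = q
        · subst hpe
          have hnone : t.contains pos = false := by
            rw [← PySem.Dict.get?_eq_none_iff_contains, ← Option.not_isSome_iff_eq_none]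
            exact hp
          have hd : ¬ |pos - s| ≤ d := fun h => hq ⟨h, hnone⟩
          simp [hp, hd]
        · simp [hp, hpe]

-- the site-major table agrees with A's first-match scan on every candidate position
lemma pvTblGet (sites ps : List Int) (t : PySem.Dict Int Int) (d pos : Int) :
    (sites.foldl (fun t site =>
        ps.foldl (fun t p => if |p - site| ≤ d ∧ t.contains p = false then t.insert p site else t) t) t).get? pos
      = if (t.get? pos).isSome then t.get? pos
        else if pos ∈ ps then pvFirstSiteIn sites pos d else none := by
  induction sites generalizing t with
  | nil => cases h : t.get? pos <;> simp [pvFirstSiteIn, h]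
  | cons s rest ih =>
    simp only [List.foldl_cons]
    rw [ih, pvTblPassGet]
    by_cases hp : (t.get? pos).isSome
    · simp [hp]
    · by_cases hm : pos ∈ ps
      · by_cases hd : |pos - s| ≤ d
        · simp [hp, hm, hd, pvFirstSiteIn]
        · simp [hp, hm, hd, pvFirstSiteIn]
      · simp [hp, hm]

-- set(editing_sites) membership is list membership
lemma pvSetContains (xs : List Int) (x : Int) :
    PySem.Set.contains (PySem.Set.ofList xs) x = xs.contains x := by
  rw [Bool.eq_iff_iff]; simp [PySem.Set.mem_ofList]

-- A's append-on-first-match fold is a filterMap pipeline over the candidates it keeps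
lemma pvFoldFilterMap (l : List (Int × Char)) (acc : List (Int × Int × Int))
    (c : Int × Char → Bool) (h : Int × Char → Int) (F : Int → Option Int) (G : Int → Int → Int × Int × Int) :
    l.foldl (fun out p =>
        if c p then
          match F (h p) with
          | some s => out ++ [G (h p) s]
          | none => out
        else out) acc
      = acc ++ (l.filterMap (fun p => if c p then some (h p) else none)).filterMap
          (fun pos => (F pos).map (fun s => G pos s)) := by
  induction l generalizing acc with
  | nil => simp
  | cons p rest ih =>
    simp only [List.foldl_cons, List.filterMap_cons]
    by_cases hc : c p
    · cases hF : F (h p) with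
      | some s => simp [hc, ih, hF]
      | none => simp [hc, ih, hF]
    · simp [hc, ih]

-- ===== VERDICT (by name: the statement is the Claim_ definition above) =====
theorem get_a_positions_in_window_spec : Claim_equal_get_a_positions_in_window := by
  intro sequence start strand editing_sites s1 e1 s2 e2 link d _hDom
  unfold Spec_get_a_positions_in_window
  unfold get_a_positions_in_window get_a_positions_in_window_alt
  simp only []
  set seq : List Char := if strand == "-" then sequence.toList.reverse else sequence.toList with hseq
  set lo : Int := if strand == "+" then start else start + 1 with hlo
  -- align A's per-element genomic position and membership test with B's
  have hbody : (PySem.List.enumerate seq).foldl (fun out p =>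
        if p.2 == 'A' && !(editing_sites.contains (if strand == "+" then start + p.1 else start + p.1 + 1)) then
          match pvFirstSiteIn editing_sites (if strand == "+" then start + p.1 else start + p.1 + 1) d with
          | some site => out ++ [((if strand == "+" then start + p.1 else start + p.1 + 1), pvGetRelativeSite s1 e1 s2 e2 (if strand == "+" then start + p.1 else start + p.1 + 1) strand link + 1, site)]
          | none => out
        else out) []
      = (PySem.List.enumerate seq).foldl (fun out p =>
        if p.2 == 'A' && !(PySem.Set.contains (PySem.Set.ofList editing_sites) (lo + p.1)) then
          match pvFirstSiteIn editing_sites (lo + p.1) d with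
          | some site => out ++ [(lo + p.1, pvGetRelativeSite s1 e1 s2 e2 (lo + p.1) strand link + 1, site)]
          | none => out
        else out) [] := by
    apply PySem.List.foldl_congr_mem
    intro acc p _hp
    have hpos : (if strand == "+" then start + p.1 else start + p.1 + 1) = lo + p.1 := by
      by_cases hs : strand == "+"
      · simp [hlo, hs]
      · simp [hlo, hs]; ring
    rw [hpos, pvSetContains]
  rw [hbody, pvFoldFilterMap (c := fun p => p.2 == 'A' && !(PySem.Set.contains (PySem.Set.ofList editing_sites) (lo + p.1)))
      (h := fun p => lo + p.1) (F := fun pos => pvFirstSiteIn editing_sites pos d)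
      (G := fun pos site => (pos, pvGetRelativeSite s1 e1 s2 e2 pos strand link + 1, site))]
  rw [List.nil_append]
  apply List.filterMap_congr
  intro pos hmem
  rw [pvTblGet editing_sites _ PySem.Dict.empty d pos]
  simp only [PySem.Dict.get?_empty, Option.isSome_none, Bool.false_eq_true, if_false, hmem, if_pos]
  cases pvFirstSiteIn editing_sites pos d <;> simp
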